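-- pv_equiv track=rewrite | github.com/be-glass/shaper_svg | lib/Contour.py | index_edge_in_poly
-- ===== SOURCE A (Python) =====
-- def index_edge_in_poly(edge, loop):
--
--     length = len(loop)
--     if length < 2:
--         return -1
--
--     loopa = loop[length - 1:] + loop[:length-1]
--     loopb = loop[1:] + loop[0:1]
--
--     search0 = [1 if edge[0] == k else 0 for k in loop]
--     search1a = [1 if edge[1] == k else 0 for k in loopa]
--     search1b = [1 if edge[1] == k else 0 for k in loopb]
--
--     search = []
--     for i in range(length):
--         a = search0[i]
--         b = search1a[i]
--         c = search1b[i]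
--
--         search.append(search0[i] + search1a[i] + search1b[i])
--
--     if 2 not in search:
--         return -1
--
--     return search.index(2)
-- ===== SOURCE B (Python) =====
-- def index_edge_in_poly(edge, loop):
--     n = len(loop)
--     if n < 2:
--         return -1
--     contribs = []
--     for j, v in enumerate(loop):
--         if v == edge[0]:
--             contribs.append(j)
--         if v == edge[1]:
--             contribs.append((j - 1) % n)
--             contribs.append((j + 1) % n)
--     cnt = {}
--     for i in contribs:
--         cnt[i] = cnt.get(i, 0) + 1
--     hits = [i for i, c in cnt.items() if c == 2]
--     return min(hits) if hits else -1
-- ===== Notes on version B (the rewrite author's own statement) =====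
-- stated objective: faster
-- what changed: Instead of scoring every index against rotated copies of the loop and scanning for the first score 2, B scatters contributions: each vertex equal to edge[0] votes for its own index and each vertex equal to edge[1] votes for both neighbouring indices; the votes are tallied in a counting dict and the answer is the minimum index with exactly 2 votes.
import Mathlib
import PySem

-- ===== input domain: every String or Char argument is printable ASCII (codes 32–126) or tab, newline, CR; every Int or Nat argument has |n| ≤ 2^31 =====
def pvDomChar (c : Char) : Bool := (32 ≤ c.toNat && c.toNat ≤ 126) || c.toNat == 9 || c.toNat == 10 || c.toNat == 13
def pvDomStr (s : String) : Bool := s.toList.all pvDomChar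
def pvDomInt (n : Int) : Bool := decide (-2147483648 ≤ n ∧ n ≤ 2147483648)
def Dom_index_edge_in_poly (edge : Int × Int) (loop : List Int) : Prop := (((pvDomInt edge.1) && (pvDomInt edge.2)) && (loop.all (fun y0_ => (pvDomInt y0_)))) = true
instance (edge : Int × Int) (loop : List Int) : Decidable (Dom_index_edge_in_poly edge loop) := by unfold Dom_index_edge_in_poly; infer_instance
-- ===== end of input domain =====

-- B replaces A's index-scoring scan over rotated copies of the loop by a scatter-gather:
-- every vertex matching edge[0] votes for its own index and every vertex matching edge[1]
-- votes for both neighbouring indices; the votes are tallied in a counting dict and the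
-- answer is the minimum index holding exactly 2 votes.

-- ===== PORT A =====
def index_edge_in_poly (edge : Int × Int) (loop : List Int) : Int :=
  let length : Int := loop.length
  if length < 2 then -1
  else
    let loopa := PySem.List.slice loop (some (length - 1)) none ++ PySem.List.slice loop none (some (length - 1))
    let loopb := PySem.List.slice loop (some 1) none ++ PySem.List.slice loop (some 0) (some 1)
    let search0 := loop.map (fun k => if edge.1 = k then (1 : Int) else 0)
    let search1a := loopa.map (fun k => if edge.2 = k then (1 : Int) else 0)
    let search1b := loopb.map (fun k => if edge.2 = k then (1 : Int) else 0)
    let search := (PySem.List.pyRange 0 length).foldl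
      (fun acc i => acc ++ [PySem.List.pyGetD search0 i 0 + PySem.List.pyGetD search1a i 0 + PySem.List.pyGetD search1b i 0]) []
    if ¬ (2 ∈ search) then -1
    else (((PySem.List.index? search 2).getD 0 : Nat) : Int)

-- ===== PORT B =====
def index_edge_in_poly_alt (edge : Int × Int) (loop : List Int) : Int :=
  let n : Int := loop.length
  if n < 2 then -1
  else
    let contribs := (PySem.List.enumerate loop).foldl
      (fun acc p =>
        let acc1 := if p.2 = edge.1 then acc ++ [p.1] else acc
        if p.2 = edge.2 then acc1 ++ [PySem.Int.mod (p.1 - 1) n, PySem.Int.mod (p.1 + 1) n] else acc1)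
      []
    let cnt := contribs.foldl (fun d i => d.insert i (d.getD i 0 + 1)) (PySem.Dict.empty : PySem.Dict Int Int)
    let hits := (cnt.items.filter (fun p => p.2 == 2)).map (·.1)
    match PySem.List.min? hits (fun x => x) with
    | some m => m
    | none => -1

-- ===== PRECONDITION & SPEC =====
def Spec_index_edge_in_poly (edge : Int × Int) (loop : List Int) (out : Int) : Prop := out = index_edge_in_poly_alt edge loop
instance (edge : Int × Int) (loop : List Int) (out : Int) : Decidable (Spec_index_edge_in_poly edge loop out) := by unfold Spec_index_edge_in_poly; infer_instance

-- ===== CLAIM (what is proved, stated in full; the proofs are below) =====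
def Claim_equal_index_edge_in_poly : Prop := ∀ (edge : Int × Int) (loop : List Int), Dom_index_edge_in_poly edge loop → Spec_index_edge_in_poly edge loop (index_edge_in_poly edge loop)

-- ===== LEMMAS AND PROOFS =====

def pvCnt (edge : Int × Int) (loop : List Int) (j : Int) : Int :=
  (if edge.1 = PySem.List.pyGetD loop j 0 then 1 else 0)
  + (if edge.2 = PySem.List.pyGetD loop (j - 1) 0 then 1 else 0)
  + (if edge.2 = PySem.List.pyGetD loop (PySem.Int.mod (j + 1) (loop.length : Int)) 0 then 1 else 0)

def pvF (edge : Int × Int) (n : Int) (p : Int × Int) : List Int :=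
  (if p.2 = edge.1 then [p.1] else []) ++
  (if p.2 = edge.2 then [PySem.Int.mod (p.1 - 1) n, PySem.Int.mod (p.1 + 1) n] else [])

lemma pvF_count (edge : Int × Int) (n i : Int) (p : Int × Int) :
    (((pvF edge n p).count i : Nat) : Int)
      = (if p.2 = edge.1 ∧ p.1 = i then (1 : Int) else 0)
        + ((if p.2 = edge.2 ∧ PySem.Int.mod (p.1 - 1) n = i then (1 : Int) else 0)
          + (if p.2 = edge.2 ∧ PySem.Int.mod (p.1 + 1) n = i then (1 : Int) else 0)) := by
  simp only [pvF, List.count_append]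
  by_cases h1 : p.2 = edge.1 <;> by_cases h2 : p.2 = edge.2 <;>
    simp [h1, h2, List.count_cons, List.count_nil] <;>
    split_ifs <;> simp_all

lemma neg_one_emod {n : Int} (hn : 0 < n) : (-1) % n = n - 1 := by
  rw [show (n - 1 : Int) = -1 + n * 1 by ring] at *
  rw [← Int.add_mul_emod_self_left (a := -1) (b := n) (c := 1)]
  rw [Int.emod_eq_of_lt (by omega) (by omega)]

lemma pyGetD_pred (loop : List Int) (h2 : 2 ≤ loop.length) (i : Int) (h0 : 0 ≤ i)
    (hi : i < (loop.length : Int)) :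
    PySem.List.pyGetD loop (i - 1) 0
      = loop.getD (PySem.Int.mod (i - 1) (loop.length : Int)).toNat 0 := by
  rw [PySem.Int.mod_eq_emod_of_pos (by omega)]
  by_cases hi0 : i = 0
  · subst hi0
    rw [show (0 - 1 : Int) = -1 by ring, neg_one_emod (by omega)]
    rw [PySem.List.pyGetD_neg_one loop 0 (by intro h; subst h; simp at h2)]
    rw [List.getD_eq_getElem loop 0 (by omega), List.getLast_eq_getElem]
    congr 1
    omega
  · rw [Int.emod_eq_of_lt (by omega) (by omega)]
    rw [PySem.List.pyGetD_eq_getElem loop 0 (by omega) (by omega),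
        List.getD_eq_getElem loop 0 (by omega)]
lemma sumIndicator (e j0 : Int) (P : Int → Prop) [DecidablePred P] (xs : List Int) :
    ∀ (s : Int), (∀ j, s ≤ j → j < s + (xs.length : Int) → (P j ↔ j = j0)) →
    ((PySem.List.enumerate xs s).map (fun p => if p.2 = e ∧ P p.1 then (1 : Int) else 0)).sum
      = if s ≤ j0 ∧ j0 < s + (xs.length : Int) ∧ xs.getD (j0 - s).toNat 0 = e then 1 else 0 := by
  induction xs with
  | nil =>
    intro s _
    rw [if_neg (by rintro ⟨h1, h2, -⟩; simp at h2; omega)]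
    simp [PySem.List.enumerate]
  | cons x t ih =>
    intro s hP
    have hlen : ((x :: t).length : Int) = (t.length : Int) + 1 := by push_cast [List.length_cons]; ring
    rw [PySem.List.enumerate_cons]
    simp only [List.map_cons, List.sum_cons]
    rw [ih (s + 1) (fun j h1 h2 => hP j (by omega) (by rw [hlen]; omega))]
    by_cases hj : j0 = s
    · subst hj
      have hPs : P j0 := (hP j0 (le_refl _) (by rw [hlen]; omega)).mpr rfl
      simp only [sub_self, Int.toNat_zero, List.getD_cons_zero]
      by_cases hx : x = e
      · rw [if_pos ⟨hx, hPs⟩, if_neg (by rintro ⟨h1, -, -⟩; omega),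
            if_pos ⟨le_refl _, by rw [hlen]; omega, hx⟩]
        norm_num
      · rw [if_neg (fun h => hx h.1), if_neg (by rintro ⟨h1, -, -⟩; omega),
            if_neg (fun h => hx h.2.2)]
        norm_num
    · have hhead : ¬ (x = e ∧ P s) := by
        intro h
        exact hj ((hP s (le_refl s) (by rw [hlen]; omega)).mp h.2).symm
      rw [if_neg hhead, zero_add]
      by_cases hlt : s + 1 ≤ j0 ∧ j0 < s + 1 + (t.length : Int)
      · have htn : (j0 - s).toNat = (j0 - (s + 1)).toNat + 1 := by omega
        have hgd : (x :: t).getD (j0 - s).toNat 0 = t.getD (j0 - (s + 1)).toNat 0 := by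
          rw [htn, List.getD_cons_succ]
        by_cases hc : t.getD (j0 - (s + 1)).toNat 0 = e
        · rw [if_pos ⟨hlt.1, hlt.2, hc⟩, if_pos ⟨by omega, by rw [hlen]; omega, by rw [hgd]; exact hc⟩]
        · rw [if_neg (by tauto), if_neg (by rintro ⟨-, -, h3⟩; rw [hgd] at h3; exact hc h3)]
      · rw [if_neg (by tauto), if_neg (by rintro ⟨h1, h2, -⟩; rw [hlen] at h2; omega)]

lemma mod_pred_eq_iff {n i : Int} (hn : 0 < n) (h0i : 0 ≤ i) (hi : i < n) (j : Int)
    (h0j : 0 ≤ j) (hj : j < n) :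
    (PySem.Int.mod (j - 1) n = i ↔ j = PySem.Int.mod (i + 1) n) := by
  rw [PySem.Int.mod_eq_emod_of_pos hn, PySem.Int.mod_eq_emod_of_pos hn]
  by_cases hj0 : j = 0
  · subst hj0
    rw [show (0 - 1 : Int) = -1 by ring, neg_one_emod hn]
    by_cases hin : i = n - 1
    · subst hin
      rw [show (n - 1 + 1 : Int) = n by ring, Int.emod_self]
      simp
    · rw [Int.emod_eq_of_lt (by omega) (by omega)]
      constructor <;> intro h <;> omega
  · rw [Int.emod_eq_of_lt (by omega) (by omega)]
    by_cases hin : i = n - 1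
    · subst hin
      rw [show (n - 1 + 1 : Int) = n by ring, Int.emod_self]
      constructor <;> intro h <;> omega
    · rw [Int.emod_eq_of_lt (by omega) (by omega)]
      constructor <;> intro h <;> omega

lemma mod_succ_eq_iff {n i : Int} (hn : 0 < n) (h0i : 0 ≤ i) (hi : i < n) (j : Int)
    (h0j : 0 ≤ j) (hj : j < n) :
    (PySem.Int.mod (j + 1) n = i ↔ j = PySem.Int.mod (i - 1) n) := by
  rw [PySem.Int.mod_eq_emod_of_pos hn, PySem.Int.mod_eq_emod_of_pos hn]
  by_cases hjn : j = n - 1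
  · subst hjn
    rw [show (n - 1 + 1 : Int) = n by ring, Int.emod_self]
    by_cases hi0 : i = 0
    · subst hi0
      rw [show (0 - 1 : Int) = -1 by ring, neg_one_emod hn]
      simp
    · rw [Int.emod_eq_of_lt (by omega) (by omega)]
      constructor <;> intro h <;> omega
  · rw [Int.emod_eq_of_lt (by omega) (by omega)]
    by_cases hi0 : i = 0
    · subst hi0
      rw [show (0 - 1 : Int) = -1 by ring, neg_one_emod hn]
      constructor <;> intro h <;> omega
    · rw [Int.emod_eq_of_lt (by omega) (by omega)]
      constructor <;> intro h <;> omega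

lemma count_contribs (edge : Int × Int) (loop : List Int) (h2 : 2 ≤ loop.length)
    (i : Int) (h0 : 0 ≤ i) (hi : i < (loop.length : Int)) :
    ((((PySem.List.enumerate loop).flatMap (pvF edge (loop.length : Int))).count i : Nat) : Int)
      = pvCnt edge loop i := by
  have hn : (0 : Int) < (loop.length : Int) := by omega
  rw [List.count_flatMap, Nat.cast_list_sum, List.map_map]
  have hpt : List.map (Nat.cast ∘ (List.count i ∘ pvF edge (loop.length : Int))) (PySem.List.enumerate loop)
      = List.map (fun p => (if p.2 = edge.1 ∧ p.1 = i then (1 : Int) else 0)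
        + ((if p.2 = edge.2 ∧ PySem.Int.mod (p.1 - 1) (loop.length : Int) = i then (1 : Int) else 0)
          + (if p.2 = edge.2 ∧ PySem.Int.mod (p.1 + 1) (loop.length : Int) = i then (1 : Int) else 0)))
        (PySem.List.enumerate loop) :=
    List.map_congr_left (fun p _ => pvF_count edge (loop.length : Int) i p)
  rw [hpt, PySem.List.sum_map_add_int, PySem.List.sum_map_add_int]
  rw [sumIndicator edge.1 i (fun j => j = i) loop 0 (fun j _ _ => Iff.rfl)]
  rw [sumIndicator edge.2 (PySem.Int.mod (i + 1) (loop.length : Int))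
      (fun j => PySem.Int.mod (j - 1) (loop.length : Int) = i) loop 0
      (fun j hj1 hj2 => mod_pred_eq_iff hn h0 hi j hj1 (by omega))]
  rw [sumIndicator edge.2 (PySem.Int.mod (i - 1) (loop.length : Int))
      (fun j => PySem.Int.mod (j + 1) (loop.length : Int) = i) loop 0
      (fun j hj1 hj2 => mod_succ_eq_iff hn h0 hi j hj1 (by omega))]
  have hm1 : 0 ≤ PySem.Int.mod (i + 1) (loop.length : Int) ∧
      PySem.Int.mod (i + 1) (loop.length : Int) < (loop.length : Int) :=
    ⟨PySem.Int.mod_nonneg _ hn, PySem.Int.mod_lt _ hn⟩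
  have hm2 : 0 ≤ PySem.Int.mod (i - 1) (loop.length : Int) ∧
      PySem.Int.mod (i - 1) (loop.length : Int) < (loop.length : Int) :=
    ⟨PySem.Int.mod_nonneg _ hn, PySem.Int.mod_lt _ hn⟩
  rw [if_congr (show (0 ≤ i ∧ i < 0 + (loop.length : Int) ∧ loop.getD (i - 0).toNat 0 = edge.1)
        ↔ edge.1 = PySem.List.pyGetD loop i 0 from by
      rw [PySem.List.pyGetD_eq_getElem loop 0 h0 hi, show i - 0 = i by ring,
          List.getD_eq_getElem loop 0 (by omega)]
      constructor
      · exact fun h => h.2.2.symm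
      · exact fun h => ⟨h0, by omega, h.symm⟩) rfl rfl]
  rw [if_congr (show (0 ≤ PySem.Int.mod (i + 1) (loop.length : Int) ∧
        PySem.Int.mod (i + 1) (loop.length : Int) < 0 + (loop.length : Int) ∧
        loop.getD (PySem.Int.mod (i + 1) (loop.length : Int) - 0).toNat 0 = edge.2)
        ↔ edge.2 = PySem.List.pyGetD loop (PySem.Int.mod (i + 1) (loop.length : Int)) 0 from by
      rw [PySem.List.pyGetD_eq_getElem loop 0 hm1.1 hm1.2, show PySem.Int.mod (i + 1) (loop.length : Int) - 0 = PySem.Int.mod (i + 1) (loop.length : Int) by ring,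
          List.getD_eq_getElem loop 0 (by omega)]
      constructor
      · exact fun h => h.2.2.symm
      · exact fun h => ⟨hm1.1, by omega, h.symm⟩) rfl rfl]
  rw [if_congr (show (0 ≤ PySem.Int.mod (i - 1) (loop.length : Int) ∧
        PySem.Int.mod (i - 1) (loop.length : Int) < 0 + (loop.length : Int) ∧
        loop.getD (PySem.Int.mod (i - 1) (loop.length : Int) - 0).toNat 0 = edge.2)
        ↔ edge.2 = PySem.List.pyGetD loop (i - 1) 0 from by
      rw [pyGetD_pred loop h2 i h0 hi, show PySem.Int.mod (i - 1) (loop.length : Int) - 0 = PySem.Int.mod (i - 1) (loop.length : Int) by ring]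
      constructor
      · exact fun h => h.2.2.symm
      · exact fun h => ⟨hm2.1, by omega, h.symm⟩) rfl rfl]
  unfold pvCnt
  ring

lemma mem_contribs_bounds (edge : Int × Int) (loop : List Int) (h2 : 2 ≤ loop.length)
    (x : Int) (hx : x ∈ (PySem.List.enumerate loop).flatMap (pvF edge (loop.length : Int))) :
    0 ≤ x ∧ x < (loop.length : Int) := by
  have hn : (0 : Int) < (loop.length : Int) := by omega
  obtain ⟨p, hp, hxp⟩ := List.mem_flatMap.mp hx
  have hfst : p.1 ∈ PySem.List.pyRange 0 (0 + (loop.length : Int)) := by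
    rw [← PySem.List.map_fst_enumerate loop 0]
    exact List.mem_map.mpr ⟨p, hp, rfl⟩
  have hp1 := (PySem.List.mem_pyRange_one).mp hfst
  simp only [pvF, List.mem_append] at hxp
  rcases hxp with h | h
  · split_ifs at h <;> simp at h
    subst h
    omega
  · split_ifs at h <;> simp at h
    rcases h with h | h <;> subst h
    · exact ⟨PySem.Int.mod_nonneg _ hn, PySem.Int.mod_lt _ hn⟩
    · exact ⟨PySem.Int.mod_nonneg _ hn, PySem.Int.mod_lt _ hn⟩

lemma contribs_eq_flatMap (edge : Int × Int) (n : Int) (l : List (Int × Int)) (acc : List Int) :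
    l.foldl (fun acc p =>
        let acc1 := if p.2 = edge.1 then acc ++ [p.1] else acc
        if p.2 = edge.2 then acc1 ++ [PySem.Int.mod (p.1 - 1) n, PySem.Int.mod (p.1 + 1) n] else acc1) acc
      = acc ++ l.flatMap (pvF edge n) := by
  have hbody : (fun (acc : List Int) (p : Int × Int) =>
      let acc1 := if p.2 = edge.1 then acc ++ [p.1] else acc
      if p.2 = edge.2 then acc1 ++ [PySem.Int.mod (p.1 - 1) n, PySem.Int.mod (p.1 + 1) n] else acc1)
      = (fun acc p => acc ++ pvF edge n p) := by
    funext acc p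
    simp only [pvF]
    split_ifs <;> simp
  rw [hbody, PySem.List.foldl_append_eq_flatMap]

lemma g_eq_cnt (edge : Int × Int) (loop : List Int) (h2 : 2 ≤ loop.length)
    (j : Int) (h0 : 0 ≤ j) (h1 : j < (loop.length : Int)) :
    PySem.List.pyGetD (loop.map (fun k => if edge.1 = k then (1 : Int) else 0)) j 0
    + PySem.List.pyGetD ((PySem.List.slice loop (some ((loop.length : Int) - 1)) none ++ PySem.List.slice loop none (some ((loop.length : Int) - 1))).map (fun k => if edge.2 = k then (1 : Int) else 0)) j 0
    + PySem.List.pyGetD ((PySem.List.slice loop (some 1) none ++ PySem.List.slice loop (some 0) (some 1)).map (fun k => if edge.2 = k then (1 : Int) else 0)) j 0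
    = pvCnt edge loop j := by
  have hjn : j.toNat < loop.length := by omega
  have hn1 : ((loop.length : Int) - 1).toNat = loop.length - 1 := by omega
  unfold pvCnt
  rw [PySem.List.slice_from loop (by omega), PySem.List.slice_to loop (by omega),
      PySem.List.slice_from loop (by omega), PySem.List.slice_toNat loop (by omega) (by omega), hn1]
  simp only [Int.toNat_one, Int.toNat_zero, List.drop_zero, Nat.sub_zero]
  rw [PySem.List.pyGetD_eq_getElem _ 0 h0 (by simpa using h1),
      PySem.List.pyGetD_eq_getElem _ 0 h0 (by simp; omega),
      PySem.List.pyGetD_eq_getElem _ 0 h0 (by simp; omega),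
      PySem.List.pyGetD_eq_getElem loop 0 h0 h1]
  simp only [List.getElem_map]
  have eA : (loop.drop (loop.length - 1) ++ loop.take (loop.length - 1))[j.toNat]'(by simp; omega)
      = PySem.List.pyGetD loop (j - 1) 0 := by
    rw [List.getElem_append]
    by_cases hj0 : j.toNat = 0
    · rw [dif_pos (by simp; omega)]
      have hj' : j = 0 := by omega
      subst hj'
      simp only [List.getElem_drop]
      simp [PySem.List.pyGetD, PySem.List.pyGet?, PySem.List.pyIdx?]
      rw [if_pos (show 1 ≤ loop.length from by omega)]
      simp [List.getElem?_eq_getElem (show loop.length - 1 < loop.length from by omega)]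
    · rw [dif_neg (by simp; omega)]
      rw [PySem.List.pyGetD_eq_getElem loop 0 (by omega) (by omega)]
      rw [List.getElem_take]
      simp only [List.length_drop]
      congr 1
      omega
  have eB : (loop.drop 1 ++ loop.take 1)[j.toNat]'(by simp; omega)
      = PySem.List.pyGetD loop (PySem.Int.mod (j + 1) (loop.length : Int)) 0 := by
    rw [List.getElem_append, PySem.Int.mod_eq_emod_of_pos (by omega)]
    by_cases hjl : j.toNat + 1 < loop.length
    · rw [dif_pos (by simp; omega)]
      rw [Int.emod_eq_of_lt (by omega) (by omega)]
      rw [PySem.List.pyGetD_eq_getElem loop 0 (by omega) (by omega)]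
      rw [List.getElem_drop]
      congr 1
      omega
    · rw [dif_neg (by simp; omega)]
      have hje : j + 1 = (loop.length : Int) := by omega
      rw [hje, Int.emod_self]
      rw [PySem.List.pyGetD_eq_getElem loop 0 (by omega) (by omega)]
      rw [List.getElem_take]
      simp only [List.length_drop]
      congr 1
      omega
  rw [eA, eB]

-- ===== VERDICT (by name: the statement is the Claim_ definition above) =====
theorem index_edge_in_poly_spec : Claim_equal_index_edge_in_poly := by
  intro edge loop _
  unfold Spec_index_edge_in_poly index_edge_in_poly index_edge_in_poly_alt
  by_cases hlt : (loop.length : Int) < 2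
  · simp [hlt]
  · simp only [hlt, if_false]
    have h2 : 2 ≤ loop.length := by exact_mod_cast not_lt.mp hlt
    have hn : (0 : Int) < (loop.length : Int) := by omega
    -- A side: the search list is the map of pvCnt over the index range
    rw [PySem.List.foldl_append_singleton_eq_map
      (fun i => PySem.List.pyGetD (loop.map (fun k => if edge.1 = k then (1 : Int) else 0)) i 0
        + PySem.List.pyGetD ((PySem.List.slice loop (some ((loop.length : Int) - 1)) none ++ PySem.List.slice loop none (some ((loop.length : Int) - 1))).map (fun k => if edge.2 = k then (1 : Int) else 0)) i 0
        + PySem.List.pyGetD ((PySem.List.slice loop (some 1) none ++ PySem.List.slice loop (some 0) (some 1)).map (fun k => if edge.2 = k then (1 : Int) else 0)) i 0)]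
    rw [List.nil_append]
    rw [List.map_congr_left (fun j hj => by
      have := (PySem.List.mem_pyRange_one).mp hj
      exact g_eq_cnt edge loop h2 j this.1 this.2)]
    -- B side: contribs as flatMap, the tally as a counter
    rw [contribs_eq_flatMap, List.nil_append, PySem.Dict.foldl_insert_getD_add_one_eq_counter,
        PySem.Dict.items_counter]
    set C := (PySem.List.enumerate loop).flatMap (pvF edge (loop.length : Int)) with hC
    have hmem : ∀ x : Int,
        (x ∈ List.map (fun p => p.1) (List.filter (fun p => p.2 == 2)
            (List.map (fun k => (k, ((List.count k C : Nat) : Int))) (PySem.Set.ofList C))))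
        ↔ (0 ≤ x ∧ x < (loop.length : Int) ∧ pvCnt edge loop x = 2) := by
      intro x
      constructor
      · intro hx
        obtain ⟨p, hp, hpx⟩ := List.mem_map.mp hx
        obtain ⟨hpmem, hpval⟩ := List.mem_filter.mp hp
        obtain ⟨k, hk, hkp⟩ := List.mem_map.mp hpmem
        have hkC : k ∈ C := (PySem.Set.mem_ofList _ _).mp hk
        have hb := mem_contribs_bounds edge loop h2 k (hC ▸ hkC)
        have hv : ((List.count k C : Nat) : Int) = 2 := by
          rw [← hkp] at hpval
          simpa using hpval
        have hx' : x = k := by rw [← hpx, ← hkp]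
        subst hx'
        refine ⟨hb.1, hb.2, ?_⟩
        rw [← count_contribs edge loop h2 x hb.1 hb.2]
        exact hC ▸ hv
      · rintro ⟨hx0, hxn, hxc⟩
        have hv : ((List.count x C : Nat) : Int) = 2 := by
          rw [hC]
          rw [show List.count x ((PySem.List.enumerate loop).flatMap (pvF edge (loop.length : Int))) = ((PySem.List.enumerate loop).flatMap (pvF edge (loop.length : Int))).count x from rfl]
          rw [count_contribs edge loop h2 x hx0 hxn]
          exact hxc
        have hxC : x ∈ C := by
          rw [hC]
          apply List.count_pos_iff.mp
          have : ((List.count x C : Nat) : Int) = 2 := hv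
          rw [hC] at this
          omega
        exact List.mem_map.mpr ⟨(x, 2), List.mem_filter.mpr ⟨List.mem_map.mpr ⟨x, (PySem.Set.mem_ofList _ _).mpr hxC, by rw [hv]⟩, by simp⟩, rfl⟩
    cases hmin : PySem.List.min? (List.map (fun x => x.1) (List.filter (fun p => p.2 == 2)
        (List.map (fun k => (k, ((List.count k C : Nat) : Int))) (PySem.Set.ofList C)))) (fun x => x) with
    | none =>
      have hnil := (PySem.List.min?_eq_none_iff _ _).mp hmin
      have hno : ¬ ((2 : Int) ∈ (PySem.List.pyRange 0 (loop.length : Int)).map (pvCnt edge loop)) := by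
        intro hmem2
        obtain ⟨j, hj, hjv⟩ := List.mem_map.mp hmem2
        have hjb := (PySem.List.mem_pyRange_one).mp hj
        have hjh := (hmem j).mpr ⟨hjb.1, by simpa using hjb.2, hjv⟩
        rw [hnil] at hjh
        simp at hjh
      rw [if_pos hno]
    | some m =>
      have hm := (hmem m).mp (PySem.List.min?_mem hmin)
      have h2in : (2 : Int) ∈ (PySem.List.pyRange 0 (loop.length : Int)).map (pvCnt edge loop) :=
        List.mem_map.mpr ⟨m, (PySem.List.mem_pyRange_one).mpr ⟨hm.1, by simpa using hm.2.1⟩, hm.2.2⟩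
      rw [if_neg (not_not_intro h2in)]
      obtain ⟨k, hk⟩ := Option.isSome_iff_exists.mp ((PySem.List.index?_isSome_iff _ _).mpr h2in)
      obtain ⟨hklen, hkval, hkmin⟩ := PySem.List.getElem_of_index?_eq_some hk
      have hkn : ((k : Nat) : Int) < (loop.length : Int) := by
        have := hklen
        simp [PySem.List.length_pyRange_one] at this
        omega
      have hkval' : pvCnt edge loop (k : Int) = 2 := by
        rw [List.getElem_map, PySem.List.getElem_pyRange_one] at hkval
        simpa using hkval
      have hkhits := (hmem (k : Int)).mpr ⟨by omega, hkn, hkval'⟩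
      have hmk : m ≤ (k : Int) := PySem.List.min?_isMin hmin _ hkhits
      have hkm : (k : Int) ≤ m := by
        by_contra hcon
        push Not at hcon
        have hmnat : m.toNat < k := by omega
        have hval2 : ((PySem.List.pyRange 0 (loop.length : Int)).map (pvCnt edge loop))[m.toNat]'(by
            simp [PySem.List.length_pyRange_one]; omega) = 2 := by
          rw [List.getElem_map, PySem.List.getElem_pyRange_one]
          rw [show ((0 : Int) + (m.toNat : Int)) = m by omega]
          exact hm.2.2
        exact hkmin m.toNat hmnat hval2
      rw [hk]
      simp only [Option.getD_some]
      omega
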